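-- pv_equiv track=rewrite | github.com/sanjaybv/advent-of-code | 2019/04/main.py | has_only_adj
-- ===== SOURCE A (Python) =====
-- def has_only_adj(num):
--     num = str(num)
--     state = 0
--     for x, y in zip(num[:-1], num[1:]):
--         if x == y:
--             state += 1
--         else:
--             if state == 1:
--                 return True
--             state = 0
--
--     return state == 1
-- ===== SOURCE B (Python) =====
-- def has_only_adj(num):
--     return any(n == 2 for n in _run_lengths(str(num)))
--
-- def _run_lengths(s):
--     if not s:
--         return []
--     return _go(s[0], 1, s[1:])
--
-- def _go(c, n, s):
--     if not s:
--         return [n]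
--     if s[0] == c:
--         return _go(s[0], n + 1, s[1:])
--     return [n] + _go(s[0], 1, s[1:])
-- ===== Notes on version B (the rewrite author's own statement) =====
-- stated objective: alternative
-- what changed: B decomposes the decimal string into runs of equal characters (a run-length encoding built by recursion) and then checks whether any run has exactly two characters, replacing A's single-pass state machine over adjacent pairs with its early return.
import Mathlib
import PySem

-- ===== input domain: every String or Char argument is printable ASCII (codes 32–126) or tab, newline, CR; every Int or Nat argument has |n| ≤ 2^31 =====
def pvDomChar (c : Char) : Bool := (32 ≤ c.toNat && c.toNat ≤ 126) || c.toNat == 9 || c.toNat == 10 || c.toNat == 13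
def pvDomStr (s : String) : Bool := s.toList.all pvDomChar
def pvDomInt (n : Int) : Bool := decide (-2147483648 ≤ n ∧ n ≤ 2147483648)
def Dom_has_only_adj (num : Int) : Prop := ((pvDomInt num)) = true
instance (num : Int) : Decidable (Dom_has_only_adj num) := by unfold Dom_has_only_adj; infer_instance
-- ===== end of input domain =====

-- B re-implements A by run-length-encoding the decimal string and checking for a run of exactly two characters
-- (alternative decomposition; same asymptotic cost).


-- ===== PORT A =====
-- the for-loop over zip(num[:-1], num[1:]) with its early return
def pvLoopA : List (Char × Char) → Int → Bool
  | [], state => state == 1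
  | (x, y) :: rest, state =>
    if x == y then pvLoopA rest (state + 1)
    else if state == 1 then true else pvLoopA rest 0

def has_only_adj (num : Int) : Bool :=
  let s := (PySem.Int.toStr num).toList
  -- s[:-1] = dropLast, s[1:] = tail (exact, also on the empty string)
  pvLoopA (List.zip s.dropLast s.tail) 0

-- ===== PORT B =====
-- _go from Source B
def pvGoB : Char → Nat → List Char → List Nat
  | _c, n, [] => [n]
  | c, n, d :: rest =>
    if d == c then pvGoB d (n + 1) rest else n :: pvGoB d 1 rest

-- _run_lengths from Source B
def pvRunLengths : List Char → List Nat
  | [] => []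
  | c :: rest => pvGoB c 1 rest

def has_only_adj_alt (num : Int) : Bool :=
  (pvRunLengths (PySem.Int.toStr num).toList).any (fun n => n == 2)

-- ===== PRECONDITION & SPEC =====
def Spec_has_only_adj (num : Int) (out : Bool) : Prop := out = has_only_adj_alt num
instance (num : Int) (out : Bool) : Decidable (Spec_has_only_adj num out) := by unfold Spec_has_only_adj; infer_instance

-- ===== CLAIM (what is proved, stated in full; the proofs are below) =====
def Claim_equal_has_only_adj : Prop := ∀ (num : Int), Dom_has_only_adj num → Spec_has_only_adj num (has_only_adj num)

-- ===== LEMMAS AND PROOFS =====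

-- A's pair state machine, started with state = n on a string whose current run already
-- has n+1 copies of c, agrees with checking B's run lengths for a 2.
theorem loopA_eq_go (rest : List Char) : ∀ (c : Char) (n : Nat),
    pvLoopA (List.zip (c :: rest).dropLast (c :: rest).tail) (n : Int)
      = (pvGoB c (n + 1) rest).any (fun k => k == 2) := by
  induction rest with
  | nil =>
    intro c n
    have hz : List.zip ([c]).dropLast ([c]).tail = ([] : List (Char × Char)) := by simp
    rw [hz]
    simp only [pvLoopA, pvGoB, List.any_cons, List.any_nil, Bool.or_false]
    rw [Bool.eq_iff_iff]
    simp only [beq_iff_eq]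
    omega
  | cons d rs ih =>
    intro c n
    have hz : List.zip (c :: d :: rs).dropLast (c :: d :: rs).tail
        = (c, d) :: List.zip (d :: rs).dropLast (d :: rs).tail := by
      cases rs <;> simp [List.zip]
    rw [hz]
    by_cases h : c = d
    · subst h
      simp only [pvLoopA, beq_self_eq_true, if_true, pvGoB]
      have : ((n : Int) + 1) = ((n + 1 : Nat) : Int) := by push_cast; ring
      rw [this, ih c (n + 1)]
    · have hcd : (c == d) = false := by simp [h]
      have hdc : (d == c) = false := by simp [Ne.symm h]
      simp only [pvLoopA, pvGoB, hcd, hdc, Bool.false_eq_true, if_false, List.any_cons]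
      by_cases hn : n = 1
      · subst hn; simp
      · have h1 : ((n : Int) == 1) = false := by
          simp only [beq_eq_false_iff_ne, ne_eq]
          intro hc; apply hn; exact_mod_cast hc
        have h2 : ((n + 1 : Nat) == 2) = false := by
          simp only [beq_eq_false_iff_ne, ne_eq]; omega
        simp only [h1, h2, Bool.false_or]
        have h0 : (0 : Int) = ((0 : Nat) : Int) := rfl
        rw [h0, ih d 0]
        simp

theorem ports_agree (num : Int) : has_only_adj num = has_only_adj_alt num := by
  unfold has_only_adj has_only_adj_alt
  cases h : (PySem.Int.toStr num).toList with
  | nil => simp [pvRunLengths, pvLoopA]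
  | cons c rest =>
    have := loopA_eq_go rest c 0
    simpa [pvRunLengths] using this

-- ===== VERDICT (by name: the statement is the Claim_ definition above) =====
theorem has_only_adj_spec : Claim_equal_has_only_adj := by
  intro num _
  unfold Spec_has_only_adj
  exact ports_agree num
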